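-- pv_equiv track=rewrite | github.com/iamistark/sol-5-py | sol1.py | convert_to_2d_array
-- ===== SOURCE A (Python) =====
-- def convert_to_2d_array(original, m, n):
--     if m * n != len(original):
--         return []  # Return an empty 2D array if it is impossible
--
--     result = [[0] * n for _ in range(m)]
--     for i in range(len(original)):
--         row = i // n
--         col = i % n
--         result[row][col] = original[i]
--
--     return result
-- ===== SOURCE B (Python) =====
-- def convert_to_2d_array(original, m, n):
--     if m * n != len(original):
--         return []  # impossible shape
--     return [original[r * n:(r + 1) * n] for r in range(m)]
-- ===== Notes on version B (the rewrite author's own statement) =====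
-- stated objective: simpler
-- what changed: Replaces the pre-zeroed m×n matrix plus per-element scatter writes result[i//n][i%n]=original[i] with a single comprehension slicing consecutive length-n chunks out of the source.
import Mathlib
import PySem

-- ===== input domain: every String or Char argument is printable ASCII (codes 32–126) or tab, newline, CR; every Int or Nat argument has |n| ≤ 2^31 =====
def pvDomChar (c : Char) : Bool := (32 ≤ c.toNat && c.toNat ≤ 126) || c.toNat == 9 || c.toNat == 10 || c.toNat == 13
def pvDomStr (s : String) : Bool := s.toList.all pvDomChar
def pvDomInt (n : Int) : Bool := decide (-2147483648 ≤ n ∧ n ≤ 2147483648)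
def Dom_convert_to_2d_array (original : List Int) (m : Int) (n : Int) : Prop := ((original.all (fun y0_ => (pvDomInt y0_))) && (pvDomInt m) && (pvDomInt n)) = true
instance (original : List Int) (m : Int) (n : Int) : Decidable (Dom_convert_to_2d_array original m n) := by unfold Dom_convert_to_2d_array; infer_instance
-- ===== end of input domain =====

-- B replaces A's pre-zeroed m×n matrix and per-element scatter result[i//n][i%n] = original[i]
-- by slicing consecutive length-n chunks out of the source (objective: simpler).

-- ===== PORT A =====
-- the loop body 'row = i // n; col = i % n; result[row][col] = original[i]';
-- inside Pre_ (once the guard has passed) row and col are nonnegative in-range indices,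
-- so .toNat / List.set / List.getD are exact for Python's subscripting here.
def pvBodyA (original : List Int) (n : Int) (res : List (List Int)) (i : Int) : List (List Int) :=
  res.set (PySem.Int.floordiv i n).toNat
    ((res.getD (PySem.Int.floordiv i n).toNat []).set (PySem.Int.mod i n).toNat
      (PySem.List.pyGetD original i 0))

def convert_to_2d_array (original : List Int) (m : Int) (n : Int) : List (List Int) :=
  if m * n ≠ (original.length : Int) then []
  else
    (PySem.List.pyRange 0 (original.length : Int) 1).foldl (pvBodyA original n)
      ((PySem.List.pyRange 0 m 1).map (fun _ => List.replicate n.toNat 0))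

-- ===== PORT B =====
def convert_to_2d_array_alt (original : List Int) (m : Int) (n : Int) : List (List Int) :=
  if m * n ≠ (original.length : Int) then []
  else
    (PySem.List.pyRange 0 m 1).map
      (fun r => PySem.List.slice original (some (r * n)) (some ((r + 1) * n)))

-- ===== PRECONDITION & SPEC =====
-- Pre_ excludes only the inputs where A raises IndexError: m<0 and n<0 with m*n == len(original)
-- (the guard passes but range(m) built no rows, so the scatter writes into a missing row).
def Pre_convert_to_2d_array (original : List Int) (m : Int) (n : Int) : Prop :=
  ¬ (m < 0 ∧ n < 0 ∧ m * n = (original.length : Int))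
instance (original : List Int) (m : Int) (n : Int) : Decidable (Pre_convert_to_2d_array original m n) := by unfold Pre_convert_to_2d_array; infer_instance

def pvWitness_convert_to_2d_array : List Int × Int × Int := ([1, 2, 3, 4, 5, 6], 2, 3)

def Spec_convert_to_2d_array (original : List Int) (m : Int) (n : Int) (out : List (List Int)) : Prop := out = convert_to_2d_array_alt original m n
instance (original : List Int) (m : Int) (n : Int) (out : List (List Int)) : Decidable (Spec_convert_to_2d_array original m n out) := by unfold Spec_convert_to_2d_array; infer_instance

-- ===== CLAIM (what is proved, stated in full; the proofs are below) =====
def Claim_equal_convert_to_2d_array : Prop := ∀ (original : List Int) (m : Int) (n : Int), Dom_convert_to_2d_array original m n → Pre_convert_to_2d_array original m n → Spec_convert_to_2d_array original m n (convert_to_2d_array original m n)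

-- ===== LEMMAS AND PROOFS =====

-- Filling one row: the scatter over indices r*N+c .. r*N+N-1 only rewrites row r,
-- replacing its tail from column c on by the matching segment of `original`.
theorem pv_inner (original : List Int) (n : Int) (N r : Nat) (hn : n = (N : Int)) (hN : 0 < N)
    (hfit : r * N + N ≤ original.length) :
    ∀ (k c : Nat), k = N - c → c ≤ N → ∀ (res : List (List Int)), r < res.length →
      (res.getD r []).length = N →
      (PySem.List.pyRange ((r * N + c : Nat) : Int) ((r * N + N : Nat) : Int) 1).foldl
        (pvBodyA original n) res
      = res.set r ((res.getD r []).take c ++ (original.drop (r * N + c)).take (N - c)) := by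
  intro k
  induction k with
  | zero =>
    intro c hk hc res hr hrow
    have hcN : c = N := by omega
    subst hcN
    rw [PySem.List.pyRange_one_eq_nil (by omega)]
    simp only [List.foldl_nil, Nat.sub_self, List.take_zero, List.append_nil]
    rw [List.getD_eq_getElem res [] hr,
      List.take_of_length_le (by rw [← List.getD_eq_getElem res [] hr, hrow])]
    exact (List.set_getElem_self hr).symm
  | succ k ih =>
    intro c hk hc res hr hrow
    have hcN : c < N := by omega
    have hlt : r * N + c < original.length := by omega
    rw [PySem.List.pyRange_one_cons
      (by exact_mod_cast (by omega : ((r * N + c : Nat) : Int) < ((r * N + N : Nat) : Int)))]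
    have h1 : PySem.Int.floordiv ((r * N + c : Nat) : Int) n = ((r : Nat) : Int) := by
      rw [hn]
      rw [show ((r * N + c : Nat) : Int) = ((N * r + c : Nat) : Int) by push_cast; ring]
      rw [PySem.Int.floordiv_natCast, Nat.mul_add_div hN, Nat.div_eq_of_lt hcN, add_zero]
    have h2 : PySem.Int.mod ((r * N + c : Nat) : Int) n = ((c : Nat) : Int) := by
      rw [hn]
      rw [show ((r * N + c : Nat) : Int) = ((N * r + c : Nat) : Int) by push_cast; ring]
      rw [PySem.Int.mod_natCast, Nat.mul_add_mod, Nat.mod_eq_of_lt hcN]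
    have hbody : pvBodyA original n res ((r * N + c : Nat) : Int)
        = res.set r ((res.getD r []).set c (original.getD (r * N + c) 0)) := by
      unfold pvBodyA
      rw [h1, h2, PySem.List.pyGetD_natCast, Int.toNat_natCast, Int.toNat_natCast]
    rw [List.foldl_cons, hbody]
    rw [show ((r * N + c : Nat) : Int) + 1 = ((r * N + (c + 1) : Nat) : Int) by push_cast; ring]
    rw [ih (c + 1) (by omega) (by omega) _ (by simpa using hr)
      (by rw [List.getD_eq_getElem _ [] (by simpa using hr), List.getElem_set_self (by simpa using hr)]
          simpa using hrow)]
    rw [List.set_set,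
      List.getD_eq_getElem ((res.set r _)) [] (by simpa using hr),
      List.getElem_set_self (by simpa using hr)]
    -- the updated row, truncated at c+1, is the old row truncated at c plus the new cell
    have hrowlen : c < (res.getD r []).length := by omega
    rw [List.set_eq_take_cons_drop _ hrowlen]
    rw [List.take_append]
    rw [List.take_of_length_le (by simp), List.length_take]
    rw [show c + 1 - min c (res.getD r []).length = 1 by omega]
    rw [List.take_succ_cons, List.take_zero]
    rw [List.drop_eq_getElem_cons hlt]
    rw [show N - c = (N - (c + 1)) + 1 by omega, List.take_succ_cons]
    rw [List.getD_eq_getElem original 0 hlt]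
    simp [show r * N + (c + 1) = r * N + c + 1 by omega]

-- Scattering row after row: starting from any matrix whose rows have length N,
-- processing rows 0..M'-1 replaces them by the chunks of `original`.
theorem pv_outer (original : List Int) (n : Int) (N : Nat) (hn : n = (N : Int)) (hN : 0 < N) :
    ∀ (M' : Nat) (res : List (List Int)), M' ≤ res.length →
      (∀ j, j < res.length → (res.getD j []).length = N) → M' * N ≤ original.length →
      (List.range M').foldl
        (fun acc r =>
          (PySem.List.pyRange ((r * N : Nat) : Int) ((r * N + N : Nat) : Int) 1).foldl
            (pvBodyA original n) acc) res
      = (List.range M').map (fun r => (original.drop (r * N)).take N) ++ res.drop M' := by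
  intro M'
  induction M' with
  | zero => intro res _ _ _; simp
  | succ M' ih =>
    intro res hle hrows hfit
    rw [List.range_succ, List.foldl_append, ih res (by omega) hrows (by nlinarith)]
    have hlen : ((List.range M').map (fun r => (original.drop (r * N)).take N) ++ res.drop M').length
        = res.length := by
      simp
      omega
    have hMlt : M' < res.length := by omega
    have hgetD : ((List.range M').map (fun r => (original.drop (r * N)).take N) ++ res.drop M').getD M' []
        = res.getD M' [] := by
      rw [List.getD_append_right _ _ [] M' (by simp)]
      simp only [List.length_map, List.length_range, Nat.sub_self]
      rw [List.drop_eq_getElem_cons hMlt]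
      simp
    rw [List.foldl_cons, List.foldl_nil]
    rw [show ((M' * N : Nat) : Int) = ((M' * N + 0 : Nat) : Int) by norm_num]
    rw [pv_inner original n N M' hn hN (by nlinarith) (N - 0) 0 rfl (by omega) _
      (by omega) (by rw [hgetD]; exact hrows M' hMlt)]
    rw [hgetD]
    simp only [List.take_zero, Nat.sub_zero, List.nil_append, Nat.add_zero]
    rw [List.drop_eq_getElem_cons hMlt, List.map_append]
    have hLlen : ((List.range M').map (fun r => (original.drop (r * N)).take N)).length = M' := by simp
    rw [List.set_append, if_neg (by omega), hLlen, Nat.sub_self]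
    simp
    rw [List.drop_eq_getElem_cons hMlt]
    rfl

theorem pv_range_split (N : Nat) : ∀ (M : Nat),
    PySem.List.pyRange 0 ((M * N : Nat) : Int) 1
      = (List.range M).flatMap
          (fun r => PySem.List.pyRange ((r * N : Nat) : Int) ((r * N + N : Nat) : Int) 1) := by
  intro M
  induction M with
  | zero => simp [PySem.List.pyRange_one_eq_nil]
  | succ M ih =>
    rw [List.range_succ, List.flatMap_append, ← ih]
    rw [show ((M + 1) * N : Nat) = (M * N + N : Nat) by ring]
    rw [PySem.List.pyRange_one_append 0 ((M * N : Nat) : Int) ((M * N + N : Nat) : Int)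
      (by positivity) (by exact_mod_cast (by omega : (M * N : Nat) ≤ M * N + N))]
    simp

-- ===== VERDICT (by name: the statement is the Claim_ definition above) =====
theorem convert_to_2d_array_spec : Claim_equal_convert_to_2d_array := by
  intro original m n _ hPre
  unfold Spec_convert_to_2d_array convert_to_2d_array convert_to_2d_array_alt
  by_cases hg : m * n ≠ (original.length : Int)
  · rw [if_pos hg, if_pos hg]
  · rw [not_ne_iff] at hg
    rw [if_neg (by omega), if_neg (by omega)]
    rcases le_or_gt m 0 with hm | hm
    · -- m ≤ 0: inside Pre_ the guard forces original = [] and both sides are []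
      have hlen0 : original.length = 0 := by
        rcases lt_or_eq_of_le hm with hm' | hm'
        · have hn0 : 0 ≤ n := by
            by_contra hneg
            exact hPre ⟨hm', by omega, hg⟩
          have : m * n ≤ 0 := mul_nonpos_of_nonpos_of_nonneg (le_of_lt hm') hn0
          omega
        · rw [hm'] at hg; simp at hg; omega
      have hnil : original = [] := List.length_eq_zero_iff.mp hlen0
      subst hnil
      simp [PySem.List.pyRange_one_eq_nil hm]
    · rcases lt_trichotomy n 0 with hn | hn | hn
      · -- impossible: m*n < 0 = length
        exfalso
        have : m * n < 0 := mul_neg_of_pos_of_neg hm hn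
        omega
      · -- n = 0: original = [], every row is empty on both sides
        subst hn
        have hlen0 : original.length = 0 := by omega
        have hnil : original = [] := List.length_eq_zero_iff.mp hlen0
        subst hnil
        simp only [List.length_nil, Nat.cast_zero, PySem.List.pyRange_zero,
          Int.toNat_zero, List.replicate_zero, mul_zero]
        apply List.map_congr_left
        intro r _
        rfl
      · -- main case: 0 < m, 0 < n
        obtain ⟨M, hMm⟩ : ∃ M : Nat, m = (M : Int) := ⟨m.toNat, (Int.toNat_of_nonneg (by omega)).symm⟩
        obtain ⟨N, hNn⟩ : ∃ N : Nat, n = (N : Int) := ⟨n.toNat, (Int.toNat_of_nonneg (by omega)).symm⟩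
        have hN : 0 < N := by omega
        have hlen : original.length = M * N := by
          have : (original.length : Int) = (M : Int) * (N : Int) := by rw [← hMm, ← hNn, hg]
          exact_mod_cast this
        have hR : PySem.List.pyRange 0 m 1 = (List.range M).map (fun k : Nat => (k : Int)) := by
          rw [hMm, PySem.List.pyRange_one]
          simp
        rw [show (original.length : Int) = ((M * N : Nat) : Int) by rw [hlen]]
        rw [pv_range_split N M, List.foldl_flatMap, hR, List.map_map, List.map_map]
        rw [pv_outer original n N hNn hN M _ (by simp)
          (by
            intro j hj
            simp only [List.length_map, List.length_range] at hj
            rw [List.getD_eq_getElem _ [] (by simpa using hj)]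
            simp [hNn])
          (by omega)]
        rw [List.drop_of_length_le (by simp), List.append_nil]
        apply List.map_congr_left
        intro k _
        simp only [Function.comp]
        rw [hNn, show ((k : Int)) * (N : Int) = ((k * N : Nat) : Int) by push_cast; ring,
          show ((k : Int) + 1) * (N : Int) = ((k * N : Nat) : Int) + ((N : Nat) : Int) by push_cast; ring,
          PySem.List.slice_natCast_add]
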